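-- pv_equiv track=rewrite | github.com/mleming/MultiMedImageML | src/multi_med_image_ml/MultiInputTester.py | get_divides
-- ===== SOURCE A (Python) =====
-- def get_divides(val,divides):
-- 	divides = sorted(divides)
-- 	for i,d in enumerate(divides):
-- 		s1 = 0 if i == 0 else divides[i-1]
-- 		s2 = d
-- 		if val <= s2:
-- 			if s1+1 == s2:
-- 				return "%d"%s2
-- 			return "%d-%d" %(s1+1,s2)
-- 	return "%s+" % divides[-1]
-- ===== SOURCE B (Python) =====
-- def get_divides(val, divides):
--     divides = sorted(divides)
--     # binary search: first index with divides[i] >= val (bisect_left)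
--     lo, hi = 0, len(divides)
--     while lo < hi:
--         mid = (lo + hi) // 2
--         if divides[mid] < val:
--             lo = mid + 1
--         else:
--             hi = mid
--     if lo == len(divides):
--         return "%s+" % divides[-1]
--     d = divides[lo]
--     s1 = 0 if lo == 0 else divides[lo - 1]
--     return "%d" % d if s1 + 1 == d else "%d-%d" % (s1 + 1, d)
-- ===== Notes on version B (the rewrite author's own statement) =====
-- stated objective: alternative
-- what changed: Replaces A's linear enumerate-scan over the sorted list with a hand-written binary search (bisect_left) that finds the first bucket bound >= val, then formats that single bucket directly; Pre_ excludes only the empty list, on which both raise IndexError.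
import Mathlib
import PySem

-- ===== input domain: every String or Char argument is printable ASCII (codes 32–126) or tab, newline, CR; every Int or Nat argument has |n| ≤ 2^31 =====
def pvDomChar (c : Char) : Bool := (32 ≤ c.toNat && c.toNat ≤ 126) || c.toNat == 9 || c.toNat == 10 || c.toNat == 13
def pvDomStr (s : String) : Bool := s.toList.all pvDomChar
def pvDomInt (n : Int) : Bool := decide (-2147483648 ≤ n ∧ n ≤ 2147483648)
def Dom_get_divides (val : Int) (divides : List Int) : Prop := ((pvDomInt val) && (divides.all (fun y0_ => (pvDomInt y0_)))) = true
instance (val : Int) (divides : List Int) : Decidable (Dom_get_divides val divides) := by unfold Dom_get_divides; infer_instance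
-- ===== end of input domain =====

-- B replaces A's linear scan over the sorted bounds with a hand-written binary search
-- (bisect_left) for the first bound >= val; same return value wherever A returns.

-- ===== PORT A =====
-- the for-loop over enumerate(divides): returns some <string> on an early return, none on fallthrough
def goA (val : Int) (ds : List Int) : List (Int × Int) → Option String
  | [] => none
  | (i, d) :: rest =>
      let s1 : Int := if i = 0 then 0 else (PySem.List.pyGet? ds (i - 1)).getD 0
      let s2 : Int := d
      if val ≤ s2 then
        some (if s1 + 1 = s2 then PySem.Int.toStr s2
              else PySem.Int.toStr (s1 + 1) ++ "-" ++ PySem.Int.toStr s2)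
      else goA val ds rest

def get_divides (val : Int) (divides : List Int) : String :=
  let ds := PySem.List.sorted divides (fun x => x) false
  match goA val ds (PySem.List.enumerate ds) with
  | some s => s
  | none =>
      match PySem.List.pyGet? ds (-1) with   -- divides[-1]; none = IndexError, excluded by Pre_
      | some d => PySem.Int.toStr d ++ "+"
      | none => ""

-- ===== PORT B =====
-- the while-loop of Source B: bisect_left on the sorted list
def blLoop (ds : List Int) (val : Int) (lo hi : Nat) : Nat :=
  if _h : lo < hi then
    let mid := (lo + hi) / 2
    if ds.getD mid 0 < val then blLoop ds val (mid + 1) hi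
    else blLoop ds val lo mid
  else lo
termination_by hi - lo
decreasing_by all_goals omega

def get_divides_alt (val : Int) (divides : List Int) : String :=
  let ds := PySem.List.sorted divides (fun x => x) false
  let i := blLoop ds val 0 ds.length
  if i = ds.length then
    match PySem.List.pyGet? ds (-1) with   -- divides[-1]; none = IndexError (empty input)
    | some d => PySem.Int.toStr d ++ "+"
    | none => ""
  else
    let d := ds.getD i 0
    let s1 : Int := if i = 0 then 0 else ds.getD (i - 1) 0
    if s1 + 1 = d then PySem.Int.toStr d
    else PySem.Int.toStr (s1 + 1) ++ "-" ++ PySem.Int.toStr d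

-- ===== PRECONDITION & SPEC =====
-- Pre_ excludes only the empty list: there Python A raises IndexError on divides[-1] (and B does too).
def Pre_get_divides (val : Int) (divides : List Int) : Prop := divides ≠ []
instance (val : Int) (divides : List Int) : Decidable (Pre_get_divides val divides) := by
  unfold Pre_get_divides; infer_instance

def pvWitness_get_divides : Int × List Int := (5, [3, 10, 7])

def Spec_get_divides (val : Int) (divides : List Int) (out : String) : Prop := out = get_divides_alt val divides
instance (val : Int) (divides : List Int) (out : String) : Decidable (Spec_get_divides val divides out) := by unfold Spec_get_divides; infer_instance

-- ===== CLAIM (what is proved, stated in full; the proofs are below) =====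
def Claim_equal_get_divides : Prop := ∀ (val : Int) (divides : List Int), Dom_get_divides val divides → Pre_get_divides val divides → Spec_get_divides val divides (get_divides val divides)

-- ===== LEMMAS AND PROOFS =====

-- the string A's loop returns at index r (and B's else-branch builds for i = r)
def fmtAt (ds : List Int) (r : Nat) : String :=
  let s2 : Int := ds.getD r 0
  let s1 : Int := if r = 0 then 0 else ds.getD (r - 1) 0
  if s1 + 1 = s2 then PySem.Int.toStr s2
  else PySem.Int.toStr (s1 + 1) ++ "-" ++ PySem.Int.toStr s2

lemma blLoop_spec (ds : List Int) (val : Int)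
    (hs : ds.Pairwise (· ≤ ·)) :
    ∀ fuel lo hi, hi - lo ≤ fuel → lo ≤ hi → hi ≤ ds.length →
    (∀ j, j < lo → ds.getD j 0 < val) →
    (∀ j, hi ≤ j → j < ds.length → val ≤ ds.getD j 0) →
    blLoop ds val lo hi ≤ ds.length ∧
    (∀ j, j < blLoop ds val lo hi → ds.getD j 0 < val) ∧
    (∀ j, blLoop ds val lo hi ≤ j → j < ds.length → val ≤ ds.getD j 0) := by
  intro fuel
  induction fuel with
  | zero =>
      intro lo hi hf hlh hhl hlow hhigh
      have : lo = hi := by omega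
      rw [blLoop]; simp [show ¬ lo < hi by omega]
      exact ⟨by omega, hlow, by simpa [this] using hhigh⟩
  | succ n ih =>
      intro lo hi hf hlh hhl hlow hhigh
      rw [blLoop]
      by_cases h : lo < hi
      · simp only [h, dif_pos]
        have hmid1 : lo ≤ (lo + hi) / 2 := by omega
        have hmid2 : (lo + hi) / 2 < hi := by omega
        have hmono : ∀ p q : Nat, p ≤ q → q < ds.length → ds.getD p 0 ≤ ds.getD q 0 := by
          intro p q hpq hq
          rcases Nat.eq_or_lt_of_le hpq with rfl | hlt
          · exact le_refl _
          · have := (List.pairwise_iff_getElem).mp hs p q (by omega) hq hlt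
            rw [List.getD_eq_getElem ds 0 (by omega), List.getD_eq_getElem ds 0 hq]
            exact this
        by_cases hc : ds.getD ((lo + hi) / 2) 0 < val
        · simp only [hc, if_pos]
          refine ih (((lo + hi) / 2) + 1) hi (by omega) (by omega) hhl ?_ hhigh
          intro j hj
          by_cases hjlo : j < lo
          · exact hlow j hjlo
          · exact lt_of_le_of_lt (hmono j ((lo + hi) / 2) (by omega) (by omega)) hc
        · simp only [hc, if_neg, not_false_iff]
          refine ih lo ((lo + hi) / 2) (by omega) (by omega) (by omega) hlow ?_
          intro j hj hjlen
          exact le_trans (not_lt.mp hc) (hmono ((lo + hi) / 2) j hj hjlen)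
      · simp only [h, dif_neg, not_false_iff]
        have : lo = hi := by omega
        exact ⟨by omega, hlow, by simpa [this] using hhigh⟩

lemma enumerate_cons {α : Type} (x : α) (t : List α) (s : Int) :
    PySem.List.enumerate (x :: t) s = (s, x) :: PySem.List.enumerate t (s + 1) := rfl

-- A's loop falls through when every element is below val
lemma goA_none (val : Int) (ds : List Int) (l : List (Int × Int))
    (h : ∀ p ∈ l, p.2 < val) : goA val ds l = none := by
  induction l with
  | nil => rfl
  | cons p rest ih =>
      obtain ⟨i, d⟩ := p
      have hd : d < val := h (i, d) (List.mem_cons_self)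
      simp only [goA, if_neg (not_le.mpr hd)]
      exact ih (fun q hq => h q (List.mem_cons_of_mem _ hq))

-- A's loop returns fmtAt ds r when r is the first index with val ≤ ds[r]
lemma goA_found (val : Int) (ds : List Int) :
    ∀ k r, k ≤ r → r < ds.length →
    (∀ j, j < r → ds.getD j 0 < val) → val ≤ ds.getD r 0 →
    goA val ds (PySem.List.enumerate (ds.drop k) k) = some (fmtAt ds r) := by
  intro k r hkr
  induction hr : r - k generalizing k with
  | zero =>
      intro hrlen hlow hhit
      have hk : k = r := by omega
      subst hk
      have hcons : ds.drop k = ds[k] :: ds.drop (k + 1) :=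
        List.drop_eq_getElem_cons hrlen
      rw [hcons, enumerate_cons]
      have hget : ds[k] = ds.getD k 0 := (List.getD_eq_getElem ds 0 hrlen).symm
      simp only [goA, hget, if_pos hhit]
      congr 1
      unfold fmtAt
      have hs1 : (if (k : Int) = 0 then (0 : Int)
          else (PySem.List.pyGet? ds ((k : Int) - 1)).getD 0)
          = (if k = 0 then (0 : Int) else ds.getD (k - 1) 0) := by
        by_cases hk0 : k = 0
        · simp [hk0]
        · have hki : ¬ ((k : Int) = 0) := by exact_mod_cast hk0
          have hc : (k : Int) - 1 = ((k - 1 : Nat) : Int) := by omega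
          rw [if_neg hki, if_neg hk0, hc, PySem.List.pyGet?_natCast]
          have : k - 1 < ds.length := by omega
          rw [List.getElem?_eq_getElem this, List.getD_eq_getElem ds 0 this]
          rfl
      rw [hs1]
  | succ n ihn =>
      intro hrlen hlow hhit
      have hklen : k < ds.length := by omega
      have hcons : ds.drop k = ds[k] :: ds.drop (k + 1) :=
        List.drop_eq_getElem_cons hklen
      rw [hcons, enumerate_cons]
      have hklt : ds.getD k 0 < val := hlow k (by omega)
      have hget : ds[k] = ds.getD k 0 := (List.getD_eq_getElem ds 0 hklen).symm
      simp only [goA, hget, if_neg (not_le.mpr hklt)]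
      exact ihn (k + 1) (by omega) (by omega) hrlen hlow hhit

-- ===== VERDICT (by name: the statement is the Claim_ definition above) =====
theorem get_divides_spec : Claim_equal_get_divides := by
  intro val divides _dom _pre
  unfold Spec_get_divides get_divides get_divides_alt
  set ds := PySem.List.sorted divides (fun x => x) false with hds
  have hs : ds.Pairwise (· ≤ ·) := by
    simpa using PySem.List.sorted_pairwise divides (fun x => x)
  obtain ⟨hle, hlow, hhigh⟩ :=
    blLoop_spec ds val hs ds.length 0 ds.length (by omega) (by omega) (le_refl _)
      (by omega) (fun j hj hjl => by omega)
  set r := blLoop ds val 0 ds.length with hr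
  by_cases hcase : r = ds.length
  · have hall : ∀ p ∈ PySem.List.enumerate ds, p.2 < val := by
      intro p hp
      have hmem : p.2 ∈ ds := by
        -- membership: the second components of enumerate are the list's elements
        clear hlow hhigh hle hcase hs hr
        have : ∀ (l : List Int) (s : Int), p ∈ PySem.List.enumerate l s → p.2 ∈ l := by
          intro l
          induction l with
          | nil => intro s h; simp [PySem.List.enumerate] at h
          | cons x t ih =>
              intro s h
              rw [enumerate_cons] at h
              rcases List.mem_cons.mp h with h1 | h2
              · subst h1; exact List.mem_cons_self
              · exact List.mem_cons_of_mem _ (ih (s + 1) h2)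
        exact this ds 0 hp
      obtain ⟨j, hj, hjeq⟩ := List.mem_iff_getElem.mp hmem
      have := hlow j (by omega)
      rw [List.getD_eq_getElem ds 0 hj] at this
      rw [← hjeq]
      exact this
    have h1 := goA_none val ds _ hall
    simp only [h1, ← hr, hcase, if_pos]
  · have hrlen : r < ds.length := by omega
    have hfound := goA_found val ds 0 r (by omega) hrlen
      (fun j hj => hlow j hj)
      (hhigh r (le_refl _) hrlen)
    simp only [List.drop_zero, Nat.cast_zero] at hfound
    simp only [hfound, ← hr, if_neg hcase, fmtAt]
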